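-- pv_equiv track=rewrite | github.com/FaisalGH9/From-Tube-to-Thought-cloud | services/youtube.py | _analyze_diagnosis_results
-- ===== SOURCE A (Python) =====
-- def _analyze_diagnosis_results(tests):
--     """Analyze diagnostic test results and provide recommendations"""
--     all_failed = all(test["status"] == "failed" for test in tests)
--
--     if all_failed:
--         errors = [test.get("error", "") for test in tests]
--
--         if any("private video" in error.lower() for error in errors):
--             return "Video is private and requires special access that cannot be obtained via yt-dlp."
--
--         if any("this video is unavailable" in error.lower() for error in errors):
--             return "Video appears to be unavailable. It may have been deleted, unlisted, or is only available in certain regions."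
--
--         if any("sign in to confirm your age" in error.lower() for error in errors):
--             return "Video is age-restricted. Your cookies might not be valid, or the current account lacks age verification."
--
--         return "Video is not accessible through any method. It might be permanently unavailable or requires special permissions."
--
--     success_tests = [test for test in tests if test["status"] == "success"]
--     if success_tests:
--         # Find the successful method
--         methods = [test["name"] for test in success_tests]
--         return f"Video is accessible using: {', '.join(methods)}. Use these methods for downloading."
--
--     return "Inconclusive results. Try updating yt-dlp or your cookies."
-- ===== SOURCE B (Python) =====
-- def _analyze_diagnosis_results(tests):
--     """Single-pass analysis: accumulate flags and success names in one loop, then decide."""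
--     all_failed = True
--     names = []
--     pv = unav = age = False
--     for test in tests:
--         status = test["status"]
--         if status != "failed":
--             all_failed = False
--         if status == "success":
--             names.append(test["name"])
--         err = test.get("error", "").lower()
--         pv = pv or "private video" in err
--         unav = unav or "this video is unavailable" in err
--         age = age or "sign in to confirm your age" in err
--     if all_failed:
--         if pv:
--             return "Video is private and requires special access that cannot be obtained via yt-dlp."
--         if unav:
--             return "Video appears to be unavailable. It may have been deleted, unlisted, or is only available in certain regions."
--         if age:
--             return "Video is age-restricted. Your cookies might not be valid, or the current account lacks age verification."
--         return "Video is not accessible through any method. It might be permanently unavailable or requires special permissions."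
--     if names:
--         return "Video is accessible using: {}. Use these methods for downloading.".format(", ".join(names))
--     return "Inconclusive results. Try updating yt-dlp or your cookies."
-- ===== Notes on version B (the rewrite author's own statement) =====
-- stated objective: alternative
-- what changed: Replaced A's five separate passes (all(), three any() scans over an errors list, a filter plus a map) by a single loop that accumulates all_failed, the success method names and three error-substring flags, then applies the same priority-ordered decision tree.
import Mathlib
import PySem

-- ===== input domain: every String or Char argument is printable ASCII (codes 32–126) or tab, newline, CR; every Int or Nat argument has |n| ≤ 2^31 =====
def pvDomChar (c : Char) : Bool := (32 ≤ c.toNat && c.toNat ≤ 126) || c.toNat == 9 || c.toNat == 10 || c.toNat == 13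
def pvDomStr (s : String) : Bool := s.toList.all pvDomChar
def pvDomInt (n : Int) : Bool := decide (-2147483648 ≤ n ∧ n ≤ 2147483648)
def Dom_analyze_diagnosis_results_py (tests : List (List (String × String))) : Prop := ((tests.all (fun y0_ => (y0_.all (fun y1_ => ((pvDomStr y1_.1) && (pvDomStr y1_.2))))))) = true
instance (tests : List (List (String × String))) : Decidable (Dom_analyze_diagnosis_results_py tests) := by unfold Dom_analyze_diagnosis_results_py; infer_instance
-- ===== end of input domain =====

-- B replaces A's five list scans by a single loop accumulating (all_failed, success names, error flags); same decision tree afterwards (objective: alternative decomposition).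

-- dict lookup (first match), shared primitive for both ports
def pvLookup (t : List (String × String)) (k : String) : Option String :=
  (t.find? (fun p => p.1 == k)).map (·.2)

-- test["..."] under Pre_ (key present); .getD "" is never reached on Pre_ inputs
def pvItem (t : List (String × String)) (k : String) : String :=
  (pvLookup t k).getD ""

-- test.get("error", "")
def pvErr (t : List (String × String)) : String :=
  (pvLookup t "error").getD ""

-- ===== PORT A =====
def analyze_diagnosis_results_py (tests : List (List (String × String))) : String :=
  let all_failed := tests.all (fun t => pvItem t "status" == "failed")
  if all_failed then
    let errors := tests.map (fun t => pvErr t)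
    if errors.any (fun e => PySem.Str.isIn "private video" (PySem.Str.lower e)) then
      "Video is private and requires special access that cannot be obtained via yt-dlp."
    else if errors.any (fun e => PySem.Str.isIn "this video is unavailable" (PySem.Str.lower e)) then
      "Video appears to be unavailable. It may have been deleted, unlisted, or is only available in certain regions."
    else if errors.any (fun e => PySem.Str.isIn "sign in to confirm your age" (PySem.Str.lower e)) then
      "Video is age-restricted. Your cookies might not be valid, or the current account lacks age verification."
    else
      "Video is not accessible through any method. It might be permanently unavailable or requires special permissions."
  else
    let success_tests := tests.filter (fun t => pvItem t "status" == "success")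
    if success_tests.isEmpty then
      "Inconclusive results. Try updating yt-dlp or your cookies."
    else
      let methods := success_tests.map (fun t => pvItem t "name")
      "Video is accessible using: " ++ PySem.Str.join ", " methods ++ ". Use these methods for downloading."

-- ===== PORT B =====
-- loop state: (all_failed, success names, private-video flag, unavailable flag, age flag)
def pvStep (acc : Bool × List String × Bool × Bool × Bool) (t : List (String × String)) :
    Bool × List String × Bool × Bool × Bool :=
  let status := pvItem t "status"
  let af := if status != "failed" then false else acc.1
  let ns := if status == "success" then acc.2.1 ++ [pvItem t "name"] else acc.2.1
  let e := PySem.Str.lower (pvErr t)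
  (af, ns,
   acc.2.2.1 || PySem.Str.isIn "private video" e,
   acc.2.2.2.1 || PySem.Str.isIn "this video is unavailable" e,
   acc.2.2.2.2 || PySem.Str.isIn "sign in to confirm your age" e)

def analyze_diagnosis_results_py_alt (tests : List (List (String × String))) : String :=
  let st := tests.foldl pvStep (true, [], false, false, false)
  if st.1 then
    if st.2.2.1 then
      "Video is private and requires special access that cannot be obtained via yt-dlp."
    else if st.2.2.2.1 then
      "Video appears to be unavailable. It may have been deleted, unlisted, or is only available in certain regions."
    else if st.2.2.2.2 then
      "Video is age-restricted. Your cookies might not be valid, or the current account lacks age verification."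
    else
      "Video is not accessible through any method. It might be permanently unavailable or requires special permissions."
  else if st.2.1.isEmpty then
    "Inconclusive results. Try updating yt-dlp or your cookies."
  else
    "Video is accessible using: " ++ PySem.Str.join ", " st.2.1 ++ ". Use these methods for downloading."

-- ===== PRECONDITION & SPEC =====
-- Pre_ excludes exactly the inputs where Python A raises KeyError: a test without a
-- "status" key, or a test with status "success" but no "name" key.
def Pre_analyze_diagnosis_results_py (tests : List (List (String × String))) : Prop :=
  ∀ t ∈ tests, (pvLookup t "status").isSome = true ∧
    (pvLookup t "status" = some "success" → (pvLookup t "name").isSome = true)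
instance (tests : List (List (String × String))) : Decidable (Pre_analyze_diagnosis_results_py tests) := by unfold Pre_analyze_diagnosis_results_py; infer_instance

def pvWitness_analyze_diagnosis_results_py : (List (List (String × String))) :=
  [[("status", "failed"), ("error", "Private video!")], [("status", "success"), ("name", "web")]]

def Spec_analyze_diagnosis_results_py (tests : List (List (String × String))) (out : String) : Prop := out = analyze_diagnosis_results_py_alt tests
instance (tests : List (List (String × String))) (out : String) : Decidable (Spec_analyze_diagnosis_results_py tests out) := by unfold Spec_analyze_diagnosis_results_py; infer_instance

-- ===== CLAIM (what is proved, stated in full; the proofs are below) =====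
def Claim_equal_analyze_diagnosis_results_py : Prop := ∀ (tests : List (List (String × String))), Dom_analyze_diagnosis_results_py tests → Pre_analyze_diagnosis_results_py tests → Spec_analyze_diagnosis_results_py tests (analyze_diagnosis_results_py tests)

-- ===== LEMMAS AND PROOFS =====

-- characterisation of B's single fold in terms of A's separate scans
theorem pvFold_char (tests : List (List (String × String)))
    (af : Bool) (ns : List String) (pv un ar : Bool) :
    tests.foldl pvStep (af, ns, pv, un, ar) =
      (af && tests.all (fun t => pvItem t "status" == "failed"),
       ns ++ (tests.filter (fun t => pvItem t "status" == "success")).map (fun t => pvItem t "name"),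
       pv || tests.any (fun t => PySem.Str.isIn "private video" (PySem.Str.lower (pvErr t))),
       un || tests.any (fun t => PySem.Str.isIn "this video is unavailable" (PySem.Str.lower (pvErr t))),
       ar || tests.any (fun t => PySem.Str.isIn "sign in to confirm your age" (PySem.Str.lower (pvErr t)))) := by
  induction tests generalizing af ns pv un ar with
  | nil => simp
  | cons t rest ih =>
    simp only [List.foldl_cons, ih, pvStep, List.all_cons, List.any_cons, List.filter_cons]
    by_cases hs : pvItem t "status" == "failed" <;>
      by_cases hx : pvItem t "status" == "success" <;>
        simp_all [Bool.or_assoc]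

-- ===== VERDICT (by name: the statement is the Claim_ definition above) =====
theorem analyze_diagnosis_results_py_spec : Claim_equal_analyze_diagnosis_results_py := by
  intro tests _ _
  unfold Spec_analyze_diagnosis_results_py analyze_diagnosis_results_py analyze_diagnosis_results_py_alt
  rw [pvFold_char]
  simp only [Bool.true_and, Bool.false_or, List.nil_append, List.any_map]
  by_cases haf : tests.all (fun t => pvItem t "status" == "failed") <;>
    simp [haf, pvErr, List.isEmpty_iff]
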